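-- pv_equiv track=rewrite | github.com/YongWookHa/Code_Interview | 2-1/2-1.py | N_game
-- ===== SOURCE A (Python) =====
-- def N_game(inputs):
--     def convert(a, n): # 숫자 a를 n진법으로
--         l = ['0', '1', '2', '3', '4', '5', '6', '7', '8', '9', 'A', 'B', 'C', 'D', 'E', 'F']
--         result = []
--         while(True):
--             x, d = divmod(a, n)
--             a = a // n
--             result.append(l[d])
--             if x == 0:
--                 break
--         result.reverse()
--         return result
--
--     n, t, m, p = (inputs[0], inputs[1], inputs[2], inputs[3])
--     num = 0 # number to convert
--     turn = 1 # current turn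
--     result = []
--     while(len(result) < t):
--         cn = convert(num, n) # list of converted number
--         for i in cn:
--             if turn == p and len(result) < t:
--                 result.append(i)
--             turn = turn+1 if turn % m is not 0 else 1
--         num+=1
--     return ''.join(str(x) for x in result)
-- ===== SOURCE B (Python) =====
-- def N_game(inputs):
--     n, t, m, p = inputs[0], inputs[1], inputs[2], inputs[3]
--     if t <= 0:
--         return ''
--     digits = '0123456789ABCDEF'
--
--     def rep(a):  # base-n representation of a, most significant digit first
--         s = ''
--         while True:
--             s = digits[a % n] + s
--             a //= n
--             if a == 0:
--                 return s
--
--     needed = p + (t - 1) * m  # stream length covering the last digit player p says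
--     chunks = []
--     total = 0
--     num = 0
--     while total < needed:
--         r = rep(num)
--         chunks.append(r)
--         total += len(r)
--         num += 1
--     stream = ''.join(chunks)
--     return ''.join(stream[i] for i in range(p - 1, len(stream), m))[:t]
-- ===== Notes on version B (the rewrite author's own statement) =====
-- stated objective: alternative
-- what changed: A simulates a per-digit turn counter with a capped append inside a doubly nested loop; B computes the exact stream length needed (p+(t-1)*m) up front, generates just that prefix of the concatenated base-n stream, and reads player p's digits off with a strided index range.
-- outside the precondition, e.g. on N_game([-2, 2, 1, 1]): A returns '0F', B returns '0F'; on N_game([2, 1, -5, 1]): A returns '0', B returns ''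
import Mathlib
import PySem

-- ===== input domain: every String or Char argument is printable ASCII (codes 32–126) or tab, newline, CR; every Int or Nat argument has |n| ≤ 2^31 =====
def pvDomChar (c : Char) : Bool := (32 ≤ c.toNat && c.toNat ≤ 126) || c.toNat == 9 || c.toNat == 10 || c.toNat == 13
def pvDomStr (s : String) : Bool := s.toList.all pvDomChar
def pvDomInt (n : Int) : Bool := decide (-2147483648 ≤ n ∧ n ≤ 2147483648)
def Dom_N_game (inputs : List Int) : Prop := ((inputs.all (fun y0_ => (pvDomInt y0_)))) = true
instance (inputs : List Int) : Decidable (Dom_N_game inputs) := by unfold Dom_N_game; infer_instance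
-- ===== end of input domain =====

-- B replaces A's per-digit turn-counter simulation by computing the needed stream length
-- p+(t-1)*m up front, generating exactly that prefix of the concatenated base-n stream, and
-- reading player p's digits off with a strided index range (objective: alternative).

-- ===== PORT A =====
def pvL16 : List Char :=
  ['0', '1', '2', '3', '4', '5', '6', '7', '8', '9', 'A', 'B', 'C', 'D', 'E', 'F']

-- convert(a, n): repeated divmod, append l[d], break when the quotient is 0, then reverse
def pvConvertA (n : Int) : Nat → Int → List Char → List Char
  | 0, _, res => res.reverse          -- fuel guard, unreachable on Pre_
  | f + 1, a, res =>
    let x := PySem.Int.floordiv a n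
    let d := PySem.Int.mod a n
    let res' := res ++ [(PySem.List.pyGet? pvL16 d).getD '?']  -- l[d]; '?' is the IndexError case, excluded by Pre_
    if x = 0 then res'.reverse else pvConvertA n f x res'

-- turn = turn+1 if turn % m is not 0 else 1
def pvNextTurn (m turn : Int) : Int :=
  if PySem.Int.mod turn m ≠ 0 then turn + 1 else 1

-- the inner 'for i in cn' loop over the state (result, turn)
def pvInnerA (p m t : Int) : List Char → Int → List Char → List Char × Int
  | [], turn, res => (res, turn)
  | c :: cs, turn, res =>
    let res' := if turn = p ∧ (res.length : Int) < t then res ++ [c] else res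
    pvInnerA p m t cs (pvNextTurn m turn) res'

def pvFuelA (t m p : Int) : Nat := (p + (t - 1) * m).toNat + 1

-- the outer 'while len(result) < t' loop, fueled (the fuel is never exhausted on Pre_)
def pvLoopA (n t m p : Int) : Nat → Int → Int → List Char → List Char
  | 0, _, _, res => res
  | f + 1, num, turn, res =>
    if (res.length : Int) < t then
      let cn := pvConvertA n (num.natAbs + 1) num []
      let s := pvInnerA p m t cn turn res
      pvLoopA n t m p f (num + 1) s.2 s.1
    else res

def N_game (inputs : List Int) : String :=
  let n := (PySem.List.pyGet? inputs 0).getD 0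
  let t := (PySem.List.pyGet? inputs 1).getD 0
  let m := (PySem.List.pyGet? inputs 2).getD 0
  let p := (PySem.List.pyGet? inputs 3).getD 0
  String.ofList (pvLoopA n t m p (pvFuelA t m p) 0 1 [])

-- ===== PORT B =====
-- rep(a): build the base-n representation front-to-back by prepending digits
-- (the same 16-symbol table pvL16 is Source B's 'digits' string)
def pvRepB (n : Int) : Nat → Int → List Char → List Char
  | 0, _, s => s                      -- fuel guard, unreachable on Pre_
  | f + 1, a, s =>
    let s' := (PySem.List.pyGet? pvL16 (PySem.Int.mod a n)).getD '?' :: s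
    let a' := PySem.Int.floordiv a n
    if a' = 0 then s' else pvRepB n f a' s'

-- the 'while total < needed' chunk-collecting loop, fueled
def pvGenB (n needed : Int) : Nat → Int → Int → List (List Char) → List (List Char)
  | 0, _, _, chunks => chunks
  | f + 1, total, num, chunks =>
    if total < needed then
      let r := pvRepB n (num.natAbs + 1) num []
      pvGenB n needed f (total + (r.length : Int)) (num + 1) (chunks ++ [r])
    else chunks

def N_game_alt (inputs : List Int) : String :=
  let n := (PySem.List.pyGet? inputs 0).getD 0
  let t := (PySem.List.pyGet? inputs 1).getD 0
  let m := (PySem.List.pyGet? inputs 2).getD 0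
  let p := (PySem.List.pyGet? inputs 3).getD 0
  if t ≤ 0 then "" else
    let needed := p + (t - 1) * m
    let stream := (pvGenB n needed (needed.toNat + 1) 0 0 []).flatten
    let picked := (PySem.List.pyRange (p - 1) (stream.length : Int) m).map
      (fun i => (PySem.List.pyGet? stream i).getD '?')
    String.ofList (PySem.List.slice picked none (some t))

-- ===== PRECONDITION & SPEC =====
-- Pre_ requires four inputs (A indexes inputs[3]) and, when t > 0 (otherwise A returns ''
-- without touching n, m, p), excludes m ≤ 0 (A divides by zero) and p outside 1..m (A loops
-- forever), and restricts n to 2..16 — A's 16-symbol digit table raises IndexError for larger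
-- bases and its convert loop never terminates for n ≤ 1 — except for the tiny cases, kept via
-- the two 'needed ≤' disjuncts, in which A never needs a digit beyond its table.  A few
-- degenerate inputs outside these bounds on which A still returns are excluded (see cites).
def Pre_N_game (inputs : List Int) : Prop :=
  4 ≤ inputs.length ∧
  (0 < inputs.getD 1 0 →
    (1 ≤ inputs.getD 2 0 ∧ 1 ≤ inputs.getD 3 0 ∧ inputs.getD 3 0 ≤ inputs.getD 2 0 ∧
      ((2 ≤ inputs.getD 0 0 ∧ inputs.getD 0 0 ≤ 16) ∨
       (17 ≤ inputs.getD 0 0 ∧ inputs.getD 3 0 + (inputs.getD 1 0 - 1) * inputs.getD 2 0 ≤ 16) ∨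
       (inputs.getD 0 0 ≠ 0 ∧ inputs.getD 3 0 + (inputs.getD 1 0 - 1) * inputs.getD 2 0 ≤ 1))))
instance (inputs : List Int) : Decidable (Pre_N_game inputs) := by unfold Pre_N_game; infer_instance

def pvWitness_N_game : List Int := [2, 4, 2, 1]

def Spec_N_game (inputs : List Int) (out : String) : Prop := out = N_game_alt inputs
instance (inputs : List Int) (out : String) : Decidable (Spec_N_game inputs out) := by unfold Spec_N_game; infer_instance

-- ===== CLAIM =====
def Claim_equal_N_game : Prop := ∀ (inputs : List Int), Dom_N_game inputs → Pre_N_game inputs → Spec_N_game inputs (N_game inputs)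

-- ===== LEMMAS AND PROOFS =====

-- the digit list both converts compute: most significant digit first
def pvDigs (n : Int) : Nat → Int → List Char
  | 0, _ => []
  | f + 1, a =>
    let d := (PySem.List.pyGet? pvL16 (PySem.Int.mod a n)).getD '?'
    if PySem.Int.floordiv a n = 0 then [d] else pvDigs n f (PySem.Int.floordiv a n) ++ [d]

lemma pvConvertA_eq (n : Int) : ∀ (f : Nat) (a : Int) (res : List Char),
    pvConvertA n f a res = pvDigs n f a ++ res.reverse := by
  intro f
  induction f with
  | zero => intro a res; simp [pvConvertA, pvDigs]
  | succ f ih =>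
    intro a res
    simp only [pvConvertA, pvDigs]
    split_ifs with h <;> simp [ih, List.reverse_append]

lemma pvRepB_eq (n : Int) : ∀ (f : Nat) (a : Int) (s : List Char),
    pvRepB n f a s = pvDigs n f a ++ s := by
  intro f
  induction f with
  | zero => intro a s; simp [pvRepB, pvDigs]
  | succ f ih =>
    intro a s
    simp only [pvRepB, pvDigs]
    split_ifs with h <;> simp [ih]

-- digits contributed by the k-th number, and the stream prefix of the first N numbers
def pvD (n : Int) (k : Nat) : List Char := pvDigs n (k + 1) (k : Int)
def pvS (n : Int) (N : Nat) : List Char := (List.range N).flatMap (pvD n)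

lemma pvS_succ (n : Int) (N : Nat) : pvS n (N + 1) = pvS n N ++ pvD n N := by
  simp [pvS, List.range_succ]

lemma pvD_ne_nil (n : Int) (k : Nat) : pvD n k ≠ [] := by
  simp only [pvD, pvDigs]
  split_ifs <;> simp

lemma pvS_len (n : Int) (N : Nat) : N ≤ (pvS n N).length := by
  induction N with
  | zero => simp [pvS]
  | succ N ih =>
    rw [pvS_succ]
    have := pvD_ne_nil n N
    have hpos : 0 < (pvD n N).length := List.length_pos_of_ne_nil this
    simp only [List.length_append]
    omega

lemma pvS_split (n : Int) (k N : Nat) (h : k ≤ N) : ∃ ys, pvS n N = pvS n k ++ ys := by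
  refine ⟨((List.range (N - k)).map (k + ·)).flatMap (pvD n), ?_⟩
  rw [show N = k + (N - k) by omega, pvS, List.range_add]
  simp [pvS, List.flatMap_append]

-- turn automaton iterated over a number of digits
def pvTurnN (m : Int) : Nat → Int → Int
  | 0, turn => turn
  | j + 1, turn => pvTurnN m j (pvNextTurn m turn)

lemma pvTurnN_add (m : Int) (a b : Nat) (turn : Int) :
    pvTurnN m (a + b) turn = pvTurnN m b (pvTurnN m a turn) := by
  induction a generalizing turn with
  | zero => rw [Nat.zero_add]; rfl
  | succ a ih =>
    rw [show a + 1 + b = (a + b) + 1 by omega,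
        show pvTurnN m ((a + b) + 1) turn = pvTurnN m (a + b) (pvNextTurn m turn) from rfl, ih]
    rfl

-- the digits player p says, starting from a given turn (A's selection, uncapped)
def pvPickF (p m : Int) : List Char → Int → List Char
  | [], _ => []
  | c :: cs, turn => (if turn = p then [c] else []) ++ pvPickF p m cs (pvNextTurn m turn)

lemma pvInnerA_eq (p m t : Int) (ht : 0 ≤ t) : ∀ (cn : List Char) (turn : Int) (res : List Char),
    pvInnerA p m t cn turn res =
      (res ++ (pvPickF p m cn turn).take (t.toNat - res.length), pvTurnN m cn.length turn) := by
  intro cn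
  induction cn with
  | nil => intro turn res; simp [pvInnerA, pvPickF, pvTurnN]
  | cons c cs ih =>
    intro turn res
    simp only [pvInnerA]
    rw [ih]
    have hsnd : pvTurnN m (c :: cs).length turn = pvTurnN m cs.length (pvNextTurn m turn) := rfl
    rw [hsnd]
    by_cases hp : turn = p
    · by_cases hl : (res.length : Int) < t
      · have h1 : t.toNat - res.length = (t.toNat - (res.length + 1)) + 1 := by omega
        simp only [pvPickF, hp, hl, and_self, if_pos, List.singleton_append]
        rw [h1, List.take_succ_cons]
        simp
      · have h0 : t.toNat - res.length = 0 := by omega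
        simp [pvPickF, hp, hl, h0]
    · simp [pvPickF, hp]

lemma pvPickF_append (p m : Int) : ∀ (xs ys : List Char) (turn : Int),
    pvPickF p m (xs ++ ys) turn = pvPickF p m xs turn ++ pvPickF p m ys (pvTurnN m xs.length turn) := by
  intro xs
  induction xs with
  | nil => intro ys turn; simp [pvPickF, pvTurnN]
  | cons c cs ih =>
    intro ys turn
    simp only [List.cons_append, pvPickF, List.length_cons]
    rw [ih]
    have : pvTurnN m (cs.length + 1) turn = pvTurnN m cs.length (pvNextTurn m turn) := rfl
    rw [this, List.append_assoc]

-- positional form of the selection: skip c digits, take one, then skip m'-1, …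
def pvPick (m' : Nat) : List Char → Nat → List Char
  | [], _ => []
  | c :: cs, 0 => c :: pvPick m' cs (m' - 1)
  | _ :: cs, j + 1 => pvPick m' cs j

lemma pvPick_nil (m' c : Nat) : pvPick m' [] c = [] := by cases c <;> rfl
lemma pvPick_cons_zero (m' : Nat) (x : Char) (cs : List Char) :
    pvPick m' (x :: cs) 0 = x :: pvPick m' cs (m' - 1) := rfl
lemma pvPick_cons_succ (m' : Nat) (x : Char) (cs : List Char) (j : Nat) :
    pvPick m' (x :: cs) (j + 1) = pvPick m' cs j := rfl

lemma pvPickF_eq_pick (p m : Int) (hm : 1 ≤ m) (hp1 : 1 ≤ p) (hpm : p ≤ m) :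
    ∀ (xs : List Char) (turn : Int), 1 ≤ turn → turn ≤ m →
      pvPickF p m xs turn = pvPick m.toNat xs ((p - turn).emod m).toNat := by
  have hms : ∀ a : Int, 0 ≤ a → a < m → a.emod m = a := fun a ha hb => Int.emod_eq_of_lt ha hb
  have hneg : ∀ a : Int, -m ≤ a → a < 0 → a.emod m = a + m := by
    intro a ha hb
    have h1 : (a + m * 1).emod m = a.emod m := Int.add_mul_emod_self_left a m 1
    have h2 : (a + m * 1).emod m = a + m * 1 := Int.emod_eq_of_lt (by omega) (by omega)
    omega
  intro xs
  induction xs with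
  | nil => intro turn h1 h2; simp [pvPickF, pvPick_nil]
  | cons c cs ih =>
    intro turn h1 h2
    have hmod : PySem.Int.mod turn m = turn.emod m := PySem.Int.mod_eq_emod_of_pos (by omega)
    simp only [pvPickF, pvNextTurn, hmod]
    by_cases hc : turn = p
    · have h0 : ((p - turn).emod m).toNat = 0 := by
        rw [hc, sub_self]
        have hz : (0 : Int).emod m = 0 := Int.zero_emod m
        rw [hz]; rfl
      rw [h0, pvPick_cons_zero]
      simp only [if_pos hc, List.singleton_append]
      congr 1
      by_cases hlt : turn < m
      · have hmv : turn.emod m = turn := hms turn (by omega) hlt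
        rw [hmv, if_pos (by omega)]
        rw [ih (turn + 1) (by omega) (by omega)]
        congr 1
        have h3 : (p - (turn + 1)).emod m = p - (turn + 1) + m := hneg _ (by omega) (by omega)
        omega
      · have htm : turn = m := by omega
        have hmv : turn.emod m = 0 := by rw [htm]; exact Int.emod_self
        rw [hmv, if_neg (by simp)]
        rw [ih 1 (by omega) (by omega)]
        congr 1
        have h3 : (p - 1).emod m = p - 1 := hms _ (by omega) (by omega)
        omega
    · have hnn : 0 ≤ (p - turn).emod m := Int.emod_nonneg _ (by omega)
      have hcv : (p - turn).emod m = if turn < p then p - turn else p - turn + m := by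
        split_ifs with hpt
        · exact hms _ (by omega) (by omega)
        · exact hneg _ (by omega) (by omega)
      obtain ⟨j, hj⟩ : ∃ j, ((p - turn).emod m).toNat = j + 1 := by
        refine ⟨((p - turn).emod m).toNat - 1, ?_⟩
        split_ifs at hcv <;> omega
      rw [hj, pvPick_cons_succ]
      simp only [if_neg hc, List.nil_append]
      by_cases hlt : turn < m
      · have hmv : turn.emod m = turn := hms turn (by omega) hlt
        rw [hmv, if_pos (by omega)]
        rw [ih (turn + 1) (by omega) (by omega)]
        congr 1
        have hcv2 : (p - (turn + 1)).emod m =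
            if turn + 1 ≤ p then p - (turn + 1) else p - (turn + 1) + m := by
          split_ifs with hpt
          · exact hms _ (by omega) (by omega)
          · exact hneg _ (by omega) (by omega)
        split_ifs at hcv hcv2 <;> omega
      · have htm : turn = m := by omega
        have hmv : turn.emod m = 0 := by rw [htm]; exact Int.emod_self
        rw [hmv, if_neg (by simp)]
        rw [ih 1 (by omega) (by omega)]
        congr 1
        have h3 : (p - 1).emod m = p - 1 := hms _ (by omega) (by omega)
        split_ifs at hcv <;> omega

lemma pvPick_take_append (m' : Nat) : ∀ (xs ys : List Char) (c k : Nat),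
    k ≤ (pvPick m' xs c).length →
    (pvPick m' (xs ++ ys) c).take k = (pvPick m' xs c).take k := by
  intro xs
  induction xs with
  | nil =>
    intro ys c k h
    simp only [pvPick_nil, List.length_nil, Nat.le_zero] at h
    simp [h, pvPick_nil]
  | cons x cs ih =>
    intro ys c k h
    cases c with
    | zero =>
      cases k with
      | zero => simp
      | succ k =>
        simp only [List.cons_append, pvPick_cons_zero, List.take_succ_cons]
        rw [ih]
        simp only [pvPick_cons_zero, List.length_cons] at h
        omega
    | succ j =>
      simp only [List.cons_append, pvPick_cons_succ]
      exact ih ys j k (by simpa only [pvPick_cons_succ] using h)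

lemma pvPick_len (m' : Nat) (hm : 1 ≤ m') : ∀ (xs : List Char) (c k : Nat),
    c + 1 + k * m' ≤ xs.length → k + 1 ≤ (pvPick m' xs c).length := by
  intro xs
  induction xs with
  | nil => intro c k h; simp only [List.length_nil] at h; omega
  | cons x cs ih =>
    intro c k h
    simp only [List.length_cons] at h
    cases c with
    | zero =>
      cases k with
      | zero => simp [pvPick_cons_zero]
      | succ k =>
        rw [Nat.succ_mul] at h
        have := ih (m' - 1) k (by omega)
        simp only [pvPick_cons_zero, List.length_cons]
        omega
    | succ j =>
      simp only [pvPick]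
      exact Nat.le_trans (ih j k (by omega)) (by omega)

lemma pyRange_nil_pos (a b s : Int) (hs : 0 < s) (h : b ≤ a) : PySem.List.pyRange a b s = [] := by
  rw [PySem.List.pyRange_of_pos a b hs, if_neg (by omega)]
  simp

lemma pyRange_cons_pos (a b s : Int) (hs : 0 < s) (hab : a < b) :
    PySem.List.pyRange a b s = a :: PySem.List.pyRange (a + s) b s := by
  rw [PySem.List.pyRange_of_pos a b hs, PySem.List.pyRange_of_pos (a + s) b hs, if_pos hab]
  by_cases h2 : a + s < b
  · rw [if_pos h2]
    have hc : ((b - a + s - 1) / s).toNat = ((b - (a + s) + s - 1) / s).toNat + 1 := by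
      have he : b - a + s - 1 = (b - (a + s) + s - 1) + 1 * s := by ring
      rw [he, Int.add_mul_ediv_right _ _ (by omega : s ≠ 0)]
      have hnn : 0 ≤ (b - (a + s) + s - 1) / s := Int.ediv_nonneg (by omega) (by omega)
      omega
    rw [hc, List.range_succ_eq_map]
    simp only [List.map_cons, List.map_map]
    refine congrArg₂ _ (by ring) ?_
    refine List.map_congr_left (fun k _ => ?_)
    simp only [Function.comp_apply]
    push_cast
    ring
  · rw [if_neg h2]
    have hc : ((b - a + s - 1) / s).toNat = 1 := by
      have he : b - a + s - 1 = (b - a - 1) + 1 * s := by ring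
      rw [he, Int.add_mul_ediv_right _ _ (by omega : s ≠ 0),
          Int.ediv_eq_zero_of_lt (by omega) (by omega)]
      rfl
    rw [hc]
    simp

lemma pyRange_shift (a b s : Int) (hs : 0 < s) :
    PySem.List.pyRange (a + 1) (b + 1) s = (PySem.List.pyRange a b s).map (· + 1) := by
  rw [PySem.List.pyRange_of_pos a b hs, PySem.List.pyRange_of_pos (a + 1) (b + 1) hs]
  have he : b + 1 - (a + 1) = b - a := by ring
  rw [he]
  split_ifs with h1 h2 h3
  · rw [List.map_map]
    refine List.map_congr_left (fun k _ => ?_)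
    simp only [Function.comp_apply]
    ring
  · omega
  · omega
  · simp

lemma pvGet_cons_succ (x : Char) (cs : List Char) (i : Int) (hi : 0 ≤ i) :
    PySem.List.pyGet? (x :: cs) (i + 1) = PySem.List.pyGet? cs i := by
  rw [show i = ((i.toNat : Nat) : Int) by omega,
      show ((i.toNat : Nat) : Int) + 1 = ((i.toNat + 1 : Nat) : Int) by push_cast; ring,
      PySem.List.pyGet?_natCast, PySem.List.pyGet?_natCast]
  simp

-- B's strided index read is exactly the positional selection
lemma pvPicked_eq (m : Int) (hm : 1 ≤ m) : ∀ (xs : List Char) (c : Nat),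
    (PySem.List.pyRange (c : Int) (xs.length : Int) m).map
      (fun i => (PySem.List.pyGet? xs i).getD '?') = pvPick m.toNat xs c := by
  intro xs
  induction xs with
  | nil =>
    intro c
    rw [pyRange_nil_pos _ _ _ (by omega) (by simp)]
    simp [pvPick_nil]
  | cons x cs ih =>
    intro c
    have hlen : ((x :: cs).length : Int) = (cs.length : Int) + 1 := by
      simp [List.length_cons]
    cases c with
    | zero =>
      rw [show (((0 : Nat) : Int)) = (0 : Int) from rfl]
      rw [pyRange_cons_pos _ _ _ (by omega) (by rw [hlen]; omega)]
      rw [List.map_cons]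
      rw [pvPick_cons_zero]
      congr 1
      · simp [PySem.List.pyGet?, PySem.List.pyIdx?]
      · rw [zero_add, hlen]
        have hsh : PySem.List.pyRange m ((cs.length : Int) + 1) m =
            (PySem.List.pyRange (m - 1) (cs.length : Int) m).map (· + 1) := by
          have h := pyRange_shift (m - 1) (cs.length : Int) m (by omega)
          simpa [show m - 1 + 1 = m by ring] using h
        rw [hsh, List.map_map]
        have hcast : (m : Int) - 1 = ((m.toNat - 1 : Nat) : Int) := by omega
        rw [hcast, ← ih (m.toNat - 1)]
        refine List.map_congr_left (fun i hi => ?_)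
        have hmem := (PySem.List.mem_pyRange_iff_of_pos (by omega : (0:Int) < m) i).mp hi
        simp only [Function.comp_apply]
        rw [pvGet_cons_succ x cs i (by omega)]
    | succ j =>
      rw [show ((((j + 1 : Nat)) : Int)) = ((j : Nat) : Int) + 1 by push_cast; ring]
      rw [hlen, pyRange_shift _ _ _ (by omega), List.map_map]
      rw [pvPick_cons_succ, ← ih j]
      refine List.map_congr_left (fun i hi => ?_)
      have hmem := (PySem.List.mem_pyRange_iff_of_pos (by omega : (0:Int) < m) i).mp hi
      simp only [Function.comp_apply]
      rw [pvGet_cons_succ x cs i (by omega)]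

lemma pvNeeded_toNat (t m p : Int) (hm : 1 ≤ m) (hp1 : 1 ≤ p) (hpm : p ≤ m) (ht : 1 ≤ t) :
    (p + (t - 1) * m).toNat = (p.toNat - 1) + 1 + (t.toNat - 1) * m.toNat := by
  obtain ⟨a, hpa, ha1⟩ : ∃ a : Nat, p = (a : Int) ∧ 1 ≤ a := ⟨p.toNat, by omega, by omega⟩
  obtain ⟨b, htb, hb1⟩ : ∃ b : Nat, t = (b : Int) ∧ 1 ≤ b := ⟨t.toNat, by omega, by omega⟩
  obtain ⟨c, hmc, hc1⟩ : ∃ c : Nat, m = (c : Int) ∧ 1 ≤ c := ⟨m.toNat, by omega, by omega⟩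
  subst hpa htb hmc
  have h1 : ((b : Int) - 1) = (((b - 1 : Nat)) : Int) := by omega
  rw [h1, ← Nat.cast_mul, ← Nat.cast_add, Int.toNat_natCast, Int.toNat_natCast,
      Int.toNat_natCast, Int.toNat_natCast]
  omega

lemma pvGenB_eq (n needed : Int) (hneed : 1 ≤ needed) :
    ∀ (f k : Nat) (chunks : List (List Char)),
      chunks.flatten = pvS n k →
      k ≤ needed.toNat →
      needed.toNat ≤ f + k →
      ∃ N : Nat, (pvGenB n needed f ((pvS n k).length : Int) (k : Int) chunks).flatten = pvS n N ∧
        needed ≤ ((pvS n N).length : Int) ∧ N ≤ needed.toNat := by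
  intro f
  induction f with
  | zero =>
    intro k chunks hflat hk hfk
    have hkN : k = needed.toNat := by omega
    subst hkN
    refine ⟨needed.toNat, by simpa [pvGenB] using hflat, ?_, le_refl _⟩
    have := pvS_len n needed.toNat
    omega
  | succ f ih =>
    intro k chunks hflat hk hfk
    simp only [pvGenB]
    by_cases hcond : ((pvS n k).length : Int) < needed
    · rw [if_pos hcond]
      have hr : pvRepB n ((k : Int)).natAbs.succ (k : Int) [] = pvD n k := by
        rw [pvRepB_eq]
        simp [pvD, Int.natAbs_natCast]
      rw [show ((k : Int)).natAbs + 1 = ((k : Int)).natAbs.succ from rfl, hr]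
      have hlen2 : ((pvS n k).length : Int) + ((pvD n k).length : Int) =
          ((pvS n (k + 1)).length : Int) := by
        rw [pvS_succ]
        push_cast [List.length_append]
        ring
      have hflat2 : (chunks ++ [pvD n k]).flatten = pvS n (k + 1) := by
        rw [List.flatten_append, hflat, pvS_succ]
        simp
      have hkN : k < needed.toNat := by
        have h1 := pvS_len n k
        omega
      have hcast : (k : Int) + 1 = ((k + 1 : Nat) : Int) := by push_cast; ring
      rw [hlen2, hcast]
      exact ih (k + 1) (chunks ++ [pvD n k]) hflat2 (by omega) (by omega)
    · rw [if_neg hcond]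
      exact ⟨k, hflat, by omega, hk⟩

lemma pvLoopA_eq (n t m p : Int) (hm : 1 ≤ m) (hp1 : 1 ≤ p) (hpm : p ≤ m) (ht : 1 ≤ t) :
    ∀ (f k : Nat) (res : List Char),
      res = (pvPickF p m (pvS n k) 1).take t.toNat →
      k ≤ (p + (t - 1) * m).toNat →
      (p + (t - 1) * m).toNat + 1 ≤ f + k →
      pvLoopA n t m p f (k : Int) (pvTurnN m (pvS n k).length 1) res =
        (pvPickF p m (pvS n (p + (t - 1) * m).toNat) 1).take t.toNat := by
  intro f
  induction f with
  | zero => intro k res hres hk hfk; omega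
  | succ f ih =>
    intro k res hres hk hfk
    simp only [pvLoopA]
    have hlen_res : res.length = min t.toNat (pvPickF p m (pvS n k) 1).length := by
      rw [hres, List.length_take]
    by_cases hcond : ((res.length : Int)) < t
    · rw [if_pos hcond]
      have hlt : (pvPickF p m (pvS n k) 1).length < t.toNat := by omega
      have hresall : res = pvPickF p m (pvS n k) 1 := by
        rw [hres]
        exact List.take_of_length_le (by omega)
      have hcn : pvConvertA n ((k : Int)).natAbs.succ (k : Int) [] = pvD n k := by
        rw [pvConvertA_eq]
        simp [pvD, Int.natAbs_natCast]
      rw [show ((k : Int)).natAbs + 1 = ((k : Int)).natAbs.succ from rfl, hcn]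
      rw [pvInnerA_eq p m t (by omega)]
      have hturn : pvTurnN m (pvD n k).length (pvTurnN m (pvS n k).length 1) =
          pvTurnN m (pvS n (k + 1)).length 1 := by
        rw [← pvTurnN_add, ← List.length_append, ← pvS_succ]
      have hres2 : res ++ (pvPickF p m (pvD n k) (pvTurnN m (pvS n k).length 1)).take
            (t.toNat - res.length) = (pvPickF p m (pvS n (k + 1)) 1).take t.toNat := by
        rw [pvS_succ, pvPickF_append, List.take_append,
            List.take_of_length_le (le_of_lt hlt), hresall]
      have hSk : (pvS n k).length < (p + (t - 1) * m).toNat := by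
        have hb := pvPickF_eq_pick p m hm hp1 hpm (pvS n k) 1 (by omega) (by omega)
        have hc0 : ((p - 1).emod m).toNat = p.toNat - 1 := by
          have h1 : (p - 1).emod m = p - 1 := Int.emod_eq_of_lt (by omega) (by omega)
          omega
        rw [hc0] at hb
        by_contra hge
        push Not at hge
        have hNeq := pvNeeded_toNat t m p hm hp1 hpm ht
        have hpl := pvPick_len m.toNat (by omega) (pvS n k) (p.toNat - 1) (t.toNat - 1)
          (by omega)
        have hleq : (pvPickF p m (pvS n k) 1).length =
            (pvPick m.toNat (pvS n k) (p.toNat - 1)).length := by rw [hb]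
        omega
      have hk1 : k + 1 ≤ (p + (t - 1) * m).toNat := by
        have := pvS_len n k
        omega
      have hcast : (k : Int) + 1 = ((k + 1 : Nat) : Int) := by push_cast; ring
      rw [hcast, hturn, hres2]
      exact ih (k + 1) _ rfl hk1 (by omega)
    · rw [if_neg hcond]
      have hget : t.toNat ≤ (pvPickF p m (pvS n k) 1).length := by omega
      obtain ⟨ys, hys⟩ := pvS_split n k (p + (t - 1) * m).toNat hk
      rw [hres, hys, pvPickF_append, List.take_append,
          show t.toNat - (pvPickF p m (pvS n k) 1).length = 0 from by omega,
          List.take_zero, List.append_nil]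

-- ===== VERDICT =====
theorem N_game_spec : Claim_equal_N_game := by
  intro inputs _ hPre
  unfold Spec_N_game
  obtain ⟨hlen4, hPre2⟩ := hPre
  rcases inputs with _ | ⟨n, _ | ⟨t, _ | ⟨m, _ | ⟨p, rest⟩⟩⟩⟩
  · exact absurd hlen4 (by simp)
  · exact absurd hlen4 (by simp)
  · exact absurd hlen4 (by simp)
  · exact absurd hlen4 (by simp)
  have e0 : (PySem.List.pyGet? (n :: t :: m :: p :: rest) 0).getD 0 = n := by
    rw [show (0:Int) = ((0:Nat):Int) from rfl, PySem.List.pyGet?_natCast]; rfl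
  have e1 : (PySem.List.pyGet? (n :: t :: m :: p :: rest) 1).getD 0 = t := by
    rw [show (1:Int) = ((1:Nat):Int) from rfl, PySem.List.pyGet?_natCast]; rfl
  have e2 : (PySem.List.pyGet? (n :: t :: m :: p :: rest) 2).getD 0 = m := by
    rw [show (2:Int) = ((2:Nat):Int) from rfl, PySem.List.pyGet?_natCast]; rfl
  have e3 : (PySem.List.pyGet? (n :: t :: m :: p :: rest) 3).getD 0 = p := by
    rw [show (3:Int) = ((3:Nat):Int) from rfl, PySem.List.pyGet?_natCast]; rfl
  have hP : 0 < t → (1 ≤ m ∧ 1 ≤ p ∧ p ≤ m ∧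
      ((2 ≤ n ∧ n ≤ 16) ∨ (17 ≤ n ∧ p + (t - 1) * m ≤ 16) ∨
        (n ≠ 0 ∧ p + (t - 1) * m ≤ 1))) := hPre2
  simp only [N_game, N_game_alt, e0, e1, e2, e3]
  by_cases ht0 : 0 < t
  · obtain ⟨hm, hp1, hpm, -⟩ := hP ht0
    have hA : pvLoopA n t m p (pvFuelA t m p) 0 1 [] =
        (pvPickF p m (pvS n ((p + (t - 1) * m).toNat)) 1).take t.toNat := by
      have h := pvLoopA_eq n t m p hm hp1 hpm (by omega) ((p + (t - 1) * m).toNat + 1) 0 []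
        (by simp [pvS, pvPickF]) (by omega) (by omega)
      exact h
    have hneed : 1 ≤ p + (t - 1) * m := by
      have := mul_nonneg (show (0:Int) ≤ t - 1 by omega) (show (0:Int) ≤ m by omega)
      omega
    obtain ⟨NB, hBflat, hBlen, hNB⟩ := pvGenB_eq n (p + (t - 1) * m) hneed
      ((p + (t - 1) * m).toNat + 1) 0 [] (by simp [pvS]) (by omega) (by omega)
    rw [if_neg (by omega)]
    have hBflat' : (pvGenB n (p + (t - 1) * m) ((p + (t - 1) * m).toNat + 1) 0 0 []).flatten
        = pvS n NB := hBflat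
    rw [hBflat']
    have hc0cast : p - 1 = ((p.toNat - 1 : Nat) : Int) := by omega
    rw [hc0cast, pvPicked_eq m hm (pvS n NB) (p.toNat - 1)]
    rw [PySem.List.slice_to (pvPick m.toNat (pvS n NB) (p.toNat - 1)) (b := t) (by omega)]
    rw [hA, pvPickF_eq_pick p m hm hp1 hpm _ 1 (by omega) (by omega)]
    have hc0 : ((p - 1).emod m).toNat = p.toNat - 1 := by
      have h1 : (p - 1).emod m = p - 1 := Int.emod_eq_of_lt (by omega) (by omega)
      omega
    rw [hc0]
    obtain ⟨ys, hys⟩ := pvS_split n NB ((p + (t - 1) * m).toNat) hNB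
    rw [hys]
    apply congrArg
    apply pvPick_take_append
    have hNeq := pvNeeded_toNat t m p hm hp1 hpm (by omega)
    have hpl := pvPick_len m.toNat (by omega) (pvS n NB) (p.toNat - 1) (t.toNat - 1) (by omega)
    omega
  · rw [if_pos (by omega)]
    show String.ofList (pvLoopA n t m p ((p + (t - 1) * m).toNat + 1) 0 1 []) = ""
    simp only [pvLoopA]
    rw [if_neg (by simp; omega)]
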